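-- pv_equiv track=rewrite | github.com/nutjob-laboratories/merk | merk/styles.py | parseBackgroundAndForegroundColor
-- ===== SOURCE A (Python) =====
-- def parseBackgroundAndForegroundColor(style):
-- 		background_color = "#FFFFFF"
-- 		text_color = "#000000"
-- 		ps = style.split(";")
-- 		for e in ps:
-- 			px = e.split(':')
-- 			if len(px)==2:
-- 				if px[0].strip().lower()=='background-color':
-- 					background_color = px[1].strip()
-- 				if px[0].strip().lower()=='color':
-- 					text_color = px[1].strip()
--
-- 		return background_color,text_color
-- ===== SOURCE B (Python) =====
-- def parseBackgroundAndForegroundColor(style):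
--     def find(decls, key, default):
--         for e in decls:
--             px = e.split(':')
--             if len(px) == 2 and px[0].strip().lower() == key:
--                 return px[1].strip()
--         return default
--     decls = style.split(";")[::-1]
--     return find(decls, 'background-color', "#FFFFFF"), find(decls, 'color', "#000000")
-- ===== Notes on version B (the rewrite author's own statement) =====
-- stated objective: alternative
-- what changed: A threads two accumulator strings through one last-wins pass; B instead reverses the declaration list and runs two independent early-exit first-match scans (one per target key), with no mutable accumulator state.
import Mathlib
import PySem

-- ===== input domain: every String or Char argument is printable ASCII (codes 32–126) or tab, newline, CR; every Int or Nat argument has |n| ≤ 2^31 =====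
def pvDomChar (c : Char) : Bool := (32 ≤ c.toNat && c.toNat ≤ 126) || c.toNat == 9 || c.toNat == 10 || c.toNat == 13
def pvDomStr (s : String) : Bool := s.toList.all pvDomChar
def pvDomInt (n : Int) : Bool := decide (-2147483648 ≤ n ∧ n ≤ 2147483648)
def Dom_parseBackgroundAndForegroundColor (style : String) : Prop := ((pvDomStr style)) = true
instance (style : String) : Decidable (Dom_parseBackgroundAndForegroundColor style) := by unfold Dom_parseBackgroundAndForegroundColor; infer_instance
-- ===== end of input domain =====

-- B replaces A's single last-wins pass over two accumulators with two independent
-- early-exit first-match scans over the reversed declaration list (objective: alternative).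

-- ===== PORT A =====
def parseBackgroundAndForegroundColor (style : String) : String × String :=
  let ps := (PySem.Str.split? style ";").getD []
  ps.foldl (fun acc e =>
      let px := (PySem.Str.split? e ":").getD []
      if px.length == 2 then
        let acc1 :=
          if PySem.Str.lower (PySem.Str.strip (PySem.List.pyGetD px 0 "")) == "background-color" then
            (PySem.Str.strip (PySem.List.pyGetD px 1 ""), acc.2)
          else acc
        if PySem.Str.lower (PySem.Str.strip (PySem.List.pyGetD px 0 "")) == "color" then
          (acc1.1, PySem.Str.strip (PySem.List.pyGetD px 1 ""))
        else acc1
      else acc)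
    ("#FFFFFF", "#000000")

-- ===== PORT B =====
-- first match wins, early return; default if no declaration of the key is found
def pvFindB (decls : List String) (key : String) (default : String) : String :=
  match decls with
  | [] => default
  | e :: rest =>
    let px := (PySem.Str.split? e ":").getD []
    if px.length == 2 && (PySem.Str.lower (PySem.Str.strip (PySem.List.pyGetD px 0 "")) == key)
    then PySem.Str.strip (PySem.List.pyGetD px 1 "")
    else pvFindB rest key default

def parseBackgroundAndForegroundColor_alt (style : String) : String × String :=
  let decls := (PySem.List.slice? ((PySem.Str.split? style ";").getD []) none none (-1)).getD []
  (pvFindB decls "background-color" "#FFFFFF", pvFindB decls "color" "#000000")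

-- ===== PRECONDITION & SPEC =====
def Spec_parseBackgroundAndForegroundColor (style : String) (out : String × String) : Prop := out = parseBackgroundAndForegroundColor_alt style
instance (style : String) (out : String × String) : Decidable (Spec_parseBackgroundAndForegroundColor style out) := by unfold Spec_parseBackgroundAndForegroundColor; infer_instance

-- ===== CLAIM (what is proved, stated in full; the proofs are below) =====
def Claim_equal_parseBackgroundAndForegroundColor : Prop := ∀ (style : String), Dom_parseBackgroundAndForegroundColor style → Spec_parseBackgroundAndForegroundColor style (parseBackgroundAndForegroundColor style)

-- ===== LEMMAS AND PROOFS =====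

-- A's loop body, named for the proofs (definitionally the lambda in the port of A).
def pvStepA (acc : String × String) (e : String) : String × String :=
  let px := (PySem.Str.split? e ":").getD []
  if px.length == 2 then
    let acc1 :=
      if PySem.Str.lower (PySem.Str.strip (PySem.List.pyGetD px 0 "")) == "background-color" then
        (PySem.Str.strip (PySem.List.pyGetD px 1 ""), acc.2)
      else acc
    if PySem.Str.lower (PySem.Str.strip (PySem.List.pyGetD px 0 "")) == "color" then
      (acc1.1, PySem.Str.strip (PySem.List.pyGetD px 1 ""))
    else acc1
  else acc

theorem pvFindB_append (l m : List String) (key d : String) :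
    pvFindB (l ++ m) key d = pvFindB l key (pvFindB m key d) := by
  induction l with
  | nil => rfl
  | cons e rest ih => simp only [List.cons_append, pvFindB, ih]

theorem pvStepA_fst (acc : String × String) (e : String) :
    (pvStepA acc e).1 = pvFindB [e] "background-color" acc.1 := by
  unfold pvStepA pvFindB
  by_cases h2 : ((PySem.Str.split? e ":").getD []).length == 2
  · by_cases hb : PySem.Str.lower (PySem.Str.strip (PySem.List.pyGetD ((PySem.Str.split? e ":").getD []) 0 "")) = "background-color" <;>
      by_cases hc : PySem.Str.lower (PySem.Str.strip (PySem.List.pyGetD ((PySem.Str.split? e ":").getD []) 0 "")) = "color" <;>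
      simp_all [pvFindB]
  · simp_all [pvFindB]

theorem pvStepA_snd (acc : String × String) (e : String) :
    (pvStepA acc e).2 = pvFindB [e] "color" acc.2 := by
  unfold pvStepA pvFindB
  by_cases h2 : ((PySem.Str.split? e ":").getD []).length == 2
  · by_cases hb : PySem.Str.lower (PySem.Str.strip (PySem.List.pyGetD ((PySem.Str.split? e ":").getD []) 0 "")) = "background-color" <;>
      by_cases hc : PySem.Str.lower (PySem.Str.strip (PySem.List.pyGetD ((PySem.Str.split? e ":").getD []) 0 "")) = "color" <;>
      simp_all [pvFindB]
  · simp_all [pvFindB]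

-- Loop invariant: A's last-wins fold equals first-match scans over the reversed list.
theorem pv_fold_eq_find (ps : List String) (acc : String × String) :
    ps.foldl pvStepA acc
      = (pvFindB ps.reverse "background-color" acc.1, pvFindB ps.reverse "color" acc.2) := by
  induction ps generalizing acc with
  | nil => rfl
  | cons e rest ih =>
    simp only [List.foldl_cons, List.reverse_cons, pvFindB_append, ih (pvStepA acc e),
      pvStepA_fst, pvStepA_snd]

-- ===== VERDICT (by name: the statement is the Claim_ definition above) =====
theorem parseBackgroundAndForegroundColor_spec : Claim_equal_parseBackgroundAndForegroundColor := by
  intro style _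
  show parseBackgroundAndForegroundColor style = parseBackgroundAndForegroundColor_alt style
  unfold parseBackgroundAndForegroundColor parseBackgroundAndForegroundColor_alt
  rw [PySem.List.slice?_none_none_neg_one]
  exact pv_fold_eq_find _ _
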